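-- pv_equiv track=rewrite | github.com/lambdafate/leetcode | weekly-contest/0216-wc/5608-test4.py | minimumEffort
-- ===== SOURCE A (Python) =====
-- from typing import List
--
-- def minimumEffort(tasks: List[List[int]]) -> int:
--     tasks.sort(key=lambda x: x[0] - x[1])
--     allEffort = 0
--     leftEffort = 0
--     i = 0
--     while i < len(tasks):
--         if leftEffort < tasks[i][1]:
--             allEffort += tasks[i][1] - leftEffort
--             leftEffort = tasks[i][1]
--         else:
--             leftEffort -= tasks[i][0]
--             i += 1
--     return allEffort
-- ===== SOURCE B (Python) =====
-- def minimumEffort(tasks):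
--     tasks.sort(key=lambda x: x[0] - x[1])
--     ans = 0
--     prefix = 0
--     for t in tasks:
--         ans = max(ans, prefix + t[1])
--         prefix += t[0]
--     return ans
-- ===== Notes on version B (the rewrite author's own statement) =====
-- stated objective: simpler
-- what changed: Replaces the leftover-energy simulation loop (which revisits each task, boosting the counter before consuming it) with a single prefix-sum pass computing max over tasks of (prefix of actual costs + minimum requirement) after the same in-place sort.
import Mathlib
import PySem

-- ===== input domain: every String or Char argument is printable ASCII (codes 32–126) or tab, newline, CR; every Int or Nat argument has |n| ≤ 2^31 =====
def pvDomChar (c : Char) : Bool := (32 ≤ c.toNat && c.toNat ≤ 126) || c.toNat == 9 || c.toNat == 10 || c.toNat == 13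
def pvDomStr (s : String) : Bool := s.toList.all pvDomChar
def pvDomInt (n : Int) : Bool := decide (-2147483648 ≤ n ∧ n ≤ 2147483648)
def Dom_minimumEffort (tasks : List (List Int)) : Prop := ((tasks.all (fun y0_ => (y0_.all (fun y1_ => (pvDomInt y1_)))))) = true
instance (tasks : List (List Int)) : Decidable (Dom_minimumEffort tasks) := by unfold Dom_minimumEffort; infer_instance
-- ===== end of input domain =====

-- B replaces A's leftover-energy simulation with a prefix-sum/max pass after the same sort (simpler decomposition).
-- Both Pythons sort `tasks` in place; the equivalence proved here is about the RETURN value (the mutation is identical anyway).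

-- ===== PORT A =====
-- A's while loop: it re-visits index i (boost step) without advancing; ported as
-- well-founded recursion on the remaining list plus the boost condition.
-- t[0]/t[1] are PySem.List.pyGet?; the `.getD 0` default is never reached inside Pre_ (sublists have length ≥ 2).
def minimumEffortLoop : List (List Int) → Int → Int → Int
  | [], allEffort, _ => allEffort
  | t :: rest, allEffort, leftEffort =>
    if leftEffort < (PySem.List.pyGet? t 1).getD 0 then
      minimumEffortLoop (t :: rest) (allEffort + ((PySem.List.pyGet? t 1).getD 0 - leftEffort)) ((PySem.List.pyGet? t 1).getD 0)
    else
      minimumEffortLoop rest allEffort (leftEffort - (PySem.List.pyGet? t 0).getD 0)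
  termination_by l _ left =>
    2 * l.length + (match l with
      | [] => 0
      | t :: _ => if left < (PySem.List.pyGet? t 1).getD 0 then 1 else 0)
  decreasing_by
    all_goals simp only [List.length_cons]
    all_goals repeat' split
    all_goals omega

def minimumEffort (tasks : List (List Int)) : Int :=
  minimumEffortLoop (PySem.List.sorted tasks (fun x => (PySem.List.pyGet? x 0).getD 0 - (PySem.List.pyGet? x 1).getD 0)) 0 0

-- ===== PORT B =====
def minimumEffort_alt (tasks : List (List Int)) : Int :=
  ((PySem.List.sorted tasks (fun x => (PySem.List.pyGet? x 0).getD 0 - (PySem.List.pyGet? x 1).getD 0)).foldl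
    (fun (p : Int × Int) t => (max p.1 (p.2 + (PySem.List.pyGet? t 1).getD 0), p.2 + (PySem.List.pyGet? t 0).getD 0))
    (0, 0)).1

-- ===== PRECONDITION & SPEC =====
-- Pre_ excludes lists containing a sublist of fewer than 2 elements, on which A's t[0]/t[1] raise IndexError.
def Pre_minimumEffort (tasks : List (List Int)) : Prop := ∀ t ∈ tasks, 2 ≤ t.length
instance (tasks : List (List Int)) : Decidable (Pre_minimumEffort tasks) := by unfold Pre_minimumEffort; infer_instance
def pvWitness_minimumEffort : List (List Int) := [[4, 8], [2, 2], [1, 3]]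

def Spec_minimumEffort (tasks : List (List Int)) (out : Int) : Prop := out = minimumEffort_alt tasks
instance (tasks : List (List Int)) (out : Int) : Decidable (Spec_minimumEffort tasks out) := by unfold Spec_minimumEffort; infer_instance

-- ===== CLAIM (what is proved, stated in full; the proofs are below) =====
def Claim_equal_minimumEffort : Prop := ∀ (tasks : List (List Int)), Dom_minimumEffort tasks → Pre_minimumEffort tasks → Spec_minimumEffort tasks (minimumEffort tasks)

-- ===== LEMMAS AND PROOFS =====

-- A's while body, collapsed one task at a time: after a boost the condition is false,
-- so processing the head is one conditional step.
theorem minimumEffortLoop_cons (t : List Int) (rest : List (List Int)) (allE leftE : Int) :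
    minimumEffortLoop (t :: rest) allE leftE =
      if leftE < (PySem.List.pyGet? t 1).getD 0 then
        minimumEffortLoop rest (allE + ((PySem.List.pyGet? t 1).getD 0 - leftE))
          ((PySem.List.pyGet? t 1).getD 0 - (PySem.List.pyGet? t 0).getD 0)
      else
        minimumEffortLoop rest allE (leftE - (PySem.List.pyGet? t 0).getD 0) := by
  rw [minimumEffortLoop]
  split
  · rw [minimumEffortLoop]
    simp
  · rfl

-- Invariant linking A's (allEffort, leftEffort) state to B's (ans, prefix) state:
-- allEffort = prefix + leftEffort, i.e. prefix = allEffort - leftEffort.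
theorem minimumEffortLoop_eq_foldl (l : List (List Int)) (allE leftE : Int) :
    minimumEffortLoop l allE leftE =
      (l.foldl (fun (p : Int × Int) t =>
          (max p.1 (p.2 + (PySem.List.pyGet? t 1).getD 0), p.2 + (PySem.List.pyGet? t 0).getD 0))
        (allE, allE - leftE)).1 := by
  induction l generalizing allE leftE with
  | nil => simp [minimumEffortLoop]
  | cons t rest ih =>
    rw [minimumEffortLoop_cons]
    simp only [List.foldl_cons]
    split
    · rename_i h
      rw [ih]
      have h1 : allE + ((PySem.List.pyGet? t 1).getD 0 - leftE) -
          ((PySem.List.pyGet? t 1).getD 0 - (PySem.List.pyGet? t 0).getD 0) =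
          allE - leftE + (PySem.List.pyGet? t 0).getD 0 := by ring
      have h2 : max allE (allE - leftE + (PySem.List.pyGet? t 1).getD 0) =
          allE + ((PySem.List.pyGet? t 1).getD 0 - leftE) := by omega
      rw [h1, h2]
    · rename_i h
      rw [ih]
      have h1 : allE - (leftE - (PySem.List.pyGet? t 0).getD 0) =
          allE - leftE + (PySem.List.pyGet? t 0).getD 0 := by ring
      have h2 : max allE (allE - leftE + (PySem.List.pyGet? t 1).getD 0) = allE := by omega
      rw [h1, h2]

-- ===== VERDICT (by name: the statement is the Claim_ definition above) =====
theorem minimumEffort_spec : Claim_equal_minimumEffort := by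
  intro tasks _ _
  unfold Spec_minimumEffort minimumEffort minimumEffort_alt
  rw [minimumEffortLoop_eq_foldl]
  norm_num
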